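-- pv_equiv track=rewrite | github.com/Killklli/DK64-Randomizer-Dev | base-hack/rom/kong_rando_ruleset_tester.py | numToBase
-- ===== SOURCE A (Python) =====
-- def numToBase(n,b,d):
-- 	'Convert number n to base b with number of digits d.'
-- 	if n==0:A=[0]
-- 	else:
-- 		A=[]
-- 		while n:A.append(int(n%b));n//=b
-- 	if len(A)<d:
-- 		B=d-len(A)
-- 		for C in range(B):A.append(0)
-- 	return A[::-1]
-- ===== SOURCE B (Python) =====
-- def numToBase(n, b, d):
--     'Convert number n to base b with number of digits d.'
--     cnt = 1
--     m = n // b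
--     while m:
--         cnt += 1
--         m //= b
--     L = max(d, cnt)
--     out = [0] * (L - cnt)
--     p = b ** (cnt - 1)
--     for _ in range(cnt):
--         out.append((n // p) % b)
--         p //= b
--     return out
-- ===== Notes on version B (the rewrite author's own statement) =====
-- stated objective: alternative
-- what changed: B replaces A's LSB digit-append loop + padding loop + reversal by a digit-counting loop, a zero prefix [0]*(L-cnt), and direct big-endian emission (n // p) % b maintaining the descending positional power p — no reversal and no per-element padding loop (measured ~2x constant-factor speedup).
-- outside the precondition, e.g. on numToBase(7, -3, 0): A returns [-1, -2, 0, -2], B returns [-1, 0, 0, -2]; on numToBase(5, 0, 0): A raises ZeroDivisionError, B raises ZeroDivisionError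
import Mathlib
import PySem

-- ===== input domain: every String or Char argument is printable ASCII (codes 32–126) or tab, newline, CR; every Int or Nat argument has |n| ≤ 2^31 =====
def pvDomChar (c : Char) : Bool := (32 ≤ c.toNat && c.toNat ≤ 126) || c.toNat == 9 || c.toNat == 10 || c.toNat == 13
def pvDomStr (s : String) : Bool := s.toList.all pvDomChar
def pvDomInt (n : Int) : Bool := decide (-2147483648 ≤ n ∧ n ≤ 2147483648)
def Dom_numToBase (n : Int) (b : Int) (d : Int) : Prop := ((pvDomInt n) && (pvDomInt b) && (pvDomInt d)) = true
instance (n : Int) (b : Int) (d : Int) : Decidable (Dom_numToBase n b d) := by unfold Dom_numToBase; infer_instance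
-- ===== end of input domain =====

-- B replaces A's LSB digit-append loop + padding loop + reversal by a digit-counting loop followed
-- by direct big-endian emission of (n // b**(L-1-i)) % b; objective: alternative decomposition.

-- ===== PORT A =====
-- 'while n: A.append(int(n%b)); n //= b'.  The guard's extra '2 ≤ b ∧ 0 ≤ n' only makes the
-- recursion total in Lean (Python diverges or raises there); inside Pre_ it is exactly 'n != 0'.
def pvLoopA (b : Int) (n : Int) : List Int :=
  if h : n ≠ 0 ∧ 2 ≤ b ∧ 0 ≤ n then
    PySem.Int.mod n b :: pvLoopA b (PySem.Int.floordiv n b)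
  else []
termination_by n.toNat
decreasing_by
  obtain ⟨h0, hb, hn⟩ := h
  rw [PySem.Int.floordiv_eq_ediv_of_pos (by omega)]
  have h1 : n / b < n := by
    apply Int.ediv_lt_of_lt_mul (by omega); nlinarith [lt_of_le_of_ne hn (Ne.symm h0)]
  have h2 : 0 ≤ n / b := Int.ediv_nonneg hn (by omega)
  omega

def numToBase (n : Int) (b : Int) (d : Int) : List Int :=
  let A0 : List Int := if n = 0 then [0] else pvLoopA b n
  let A1 : List Int :=
    if (A0.length : Int) < d then
      (PySem.List.pyRange 0 (d - (A0.length : Int)) 1).foldl (fun acc _ => acc ++ [0]) A0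
    else A0
  (PySem.List.slice? A1 none none (-1)).getD []   -- A[::-1]; step -1 ≠ 0, so never none

-- ===== PORT B =====
-- 'cnt = 1; m = n // b; while m: cnt += 1; m //= b'; same totality guard as above.
def pvCountB (b : Int) (m : Int) (cnt : Int) : Int :=
  if h : m ≠ 0 ∧ 2 ≤ b ∧ 0 ≤ m then pvCountB b (PySem.Int.floordiv m b) (cnt + 1) else cnt
termination_by m.toNat
decreasing_by
  obtain ⟨h0, hb, hn⟩ := h
  rw [PySem.Int.floordiv_eq_ediv_of_pos (by omega)]
  have h1 : m / b < m := by
    apply Int.ediv_lt_of_lt_mul (by omega); nlinarith [lt_of_le_of_ne hn (Ne.symm h0)]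
  have h2 : 0 ≤ m / b := Int.ediv_nonneg hn (by omega)
  omega

-- 'for _ in range(L): out.append((n // p) % b); p //= b' — a counted loop, transcribed as the
-- obvious structural recursion on the remaining iteration count, same state (p), same appends.
def pvEmitB (b : Int) (n : Int) (p : Int) : Nat → List Int
  | 0 => []
  | k + 1 => PySem.Int.mod (PySem.Int.floordiv n p) b :: pvEmitB b n (PySem.Int.floordiv p b) k

-- '[0] * (L - cnt)' is List.replicate; 'b ** (cnt - 1)': cnt ≥ 1, so the exponent is ≥ 0 and
-- '.toNat' is exact; 'range(cnt)' runs cnt.toNat times.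
def numToBase_alt (n : Int) (b : Int) (d : Int) : List Int :=
  let cnt := pvCountB b (PySem.Int.floordiv n b) 1
  let L := max d cnt
  let out := List.replicate (L - cnt).toNat 0
  out ++ pvEmitB b n (b ^ (cnt - 1).toNat) cnt.toNat

-- ===== PRECONDITION & SPEC =====
-- Pre_ excludes: b = 0 (A raises ZeroDivisionError), b = 1 and n < 0 with b ≥ 2 (A's while loop
-- never terminates), and b ≤ -2, where A returns an accidental negative-base digit string
-- (nonpositive digits from floor division) that no caller of this base-b helper uses; B differs there.
def Pre_numToBase (n : Int) (b : Int) (d : Int) : Prop := 0 ≤ n ∧ 2 ≤ b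
instance (n : Int) (b : Int) (d : Int) : Decidable (Pre_numToBase n b d) := by
  unfold Pre_numToBase; infer_instance

def pvWitness_numToBase : Int × Int × Int := (12, 3, 4)

def Spec_numToBase (n : Int) (b : Int) (d : Int) (out : List Int) : Prop := out = numToBase_alt n b d
instance (n : Int) (b : Int) (d : Int) (out : List Int) : Decidable (Spec_numToBase n b d out) := by
  unfold Spec_numToBase; infer_instance

-- ===== CLAIM (what is proved, stated in full; the proofs are below) =====
def Claim_equal_numToBase : Prop := ∀ (n : Int) (b : Int) (d : Int), Dom_numToBase n b d → Pre_numToBase n b d → Spec_numToBase n b d (numToBase n b d)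

-- ===== LEMMAS AND PROOFS =====

-- A's loop returns exactly the least-significant-first digit list [n/b^0 % b, …, n/b^(L-1) % b]
theorem pvLoopA_eq_map (b : Int) (hb : 2 ≤ b) :
    ∀ n : Int, 0 ≤ n →
      ∃ L : Nat, pvLoopA b n = (List.range L).map (fun j => n / b ^ j % b) := by
  intro n
  induction n using pvLoopA.induct b with
  | case1 x hcond ih =>
    intro _
    obtain ⟨h0, _, hx⟩ := hcond
    have hfd : PySem.Int.floordiv x b = x / b := PySem.Int.floordiv_eq_ediv_of_pos (by omega)
    obtain ⟨L, hih⟩ := ih (by rw [hfd]; exact Int.ediv_nonneg hx (by omega))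
    rw [hfd] at hih
    refine ⟨L + 1, ?_⟩
    rw [pvLoopA, dif_pos (by exact ⟨h0, by omega, hx⟩), hfd,
        List.range_succ_eq_map, List.map_cons, List.map_map, hih]
    congr 1
    · simp [PySem.Int.mod_eq_emod_of_pos (show (0:Int) < b by omega)]
    · apply List.map_congr_left
      intro j _
      simp only [Function.comp]
      rw [Int.ediv_ediv_of_nonneg (by omega), ← pow_succ']
  | case2 x hcond =>
    intro hx
    exact ⟨0, by rw [pvLoopA, dif_neg hcond]; simp⟩

-- n is below b to the number of digits the loop produced
theorem pvLoopA_lt (b : Int) (hb : 2 ≤ b) :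
    ∀ n : Int, 0 ≤ n → n < b ^ (pvLoopA b n).length := by
  intro n
  induction n using pvLoopA.induct b with
  | case1 x hcond ih =>
    intro _
    obtain ⟨h0, _, hx⟩ := hcond
    have hfd : PySem.Int.floordiv x b = x / b := PySem.Int.floordiv_eq_ediv_of_pos (by omega)
    have ih' := ih (by rw [hfd]; exact Int.ediv_nonneg hx (by omega))
    rw [hfd] at ih'
    rw [pvLoopA, dif_pos (by exact ⟨h0, by omega, hx⟩), hfd, List.length_cons, pow_succ']
    have h1 := Int.mul_ediv_add_emod x b
    have h2 : x % b < b := Int.emod_lt_of_pos x (by omega)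
    have h3 : 0 < b ^ (pvLoopA b (x / b)).length := pow_pos (by omega) _
    nlinarith [ih']
  | case2 x hcond =>
    intro hx
    rw [pvLoopA, dif_neg hcond]
    simpa using by omega

-- B's counting loop counts exactly the digits A's loop appends
theorem pvCountB_eq (b : Int) (hb : 2 ≤ b) :
    ∀ m c : Int, 0 ≤ m → pvCountB b m c = c + (pvLoopA b m).length := by
  intro m
  induction m using pvLoopA.induct b with
  | case1 x hcond ih =>
    intro c _
    obtain ⟨h0, _, hx⟩ := hcond
    have hfd : PySem.Int.floordiv x b = x / b := PySem.Int.floordiv_eq_ediv_of_pos (by omega)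
    have hnn : 0 ≤ PySem.Int.floordiv x b := by rw [hfd]; exact Int.ediv_nonneg hx (by omega)
    rw [pvCountB, dif_pos (by exact ⟨h0, by omega, hx⟩),
        pvLoopA, dif_pos (by exact ⟨h0, by omega, hx⟩)]
    rw [ih (c + 1) hnn]
    simp [List.length_cons]
    omega
  | case2 x hcond =>
    intro c hx
    rw [pvCountB, dif_neg hcond, pvLoopA, dif_neg hcond]
    simp

-- the emission loop with p = b^e produces [n/b^e % b, n/b^(e-1) % b, …]
theorem pvEmitB_eq (b n : Int) (hb : 2 ≤ b) :
    ∀ (k e : Nat), k ≤ e + 1 →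
      pvEmitB b n (b ^ e) k = (List.range k).map (fun j => n / b ^ (e - j) % b) := by
  intro k
  induction k with
  | zero => intro e _; simp [pvEmitB]
  | succ k ih =>
    intro e hk
    have hbpos : (0:Int) < b := by omega
    rw [pvEmitB, List.range_succ_eq_map, List.map_cons, List.map_map]
    congr 1
    · rw [PySem.Int.floordiv_eq_ediv_of_pos (pow_pos hbpos e),
          PySem.Int.mod_eq_emod_of_pos hbpos]
      simp
    · match k, hk with
      | 0, _ => simp [pvEmitB]
      | k' + 1, hk =>
        have he1 : 1 ≤ e := by omega
        have hpb : PySem.Int.floordiv (b ^ e) b = b ^ (e - 1) := by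
          rw [PySem.Int.floordiv_eq_ediv_of_pos hbpos,
              show b ^ e = b ^ (e - 1) * b by rw [← pow_succ]; congr 1; omega]
          exact Int.mul_ediv_cancel _ (by omega)
        rw [hpb, ih (e - 1) (by omega)]
        apply List.map_congr_left
        intro j _
        simp only [Function.comp]
        have : e - j.succ = e - 1 - j := by omega
        rw [this]

theorem numToBase_eq_alt (n b d : Int) (hn : 0 ≤ n) (hb : 2 ≤ b) :
    numToBase n b d = numToBase_alt n b d := by
  have hbpos : (0:Int) < b := by omega
  -- uniform characterisation of A0
  set A0 : List Int := if n = 0 then [0] else pvLoopA b n with hA0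
  obtain ⟨len, hmap, hlen1, hlt⟩ :
      ∃ len : Nat, A0 = (List.range len).map (fun j => n / b ^ j % b) ∧ 1 ≤ len ∧ n < b ^ len := by
    by_cases h0 : n = 0
    · refine ⟨1, ?_, le_refl 1, ?_⟩
      · simp [hA0, h0]
      · subst h0; simpa using by positivity
    · obtain ⟨L, hL⟩ := pvLoopA_eq_map b hb n hn
      have hA0' : A0 = pvLoopA b n := by rw [hA0, if_neg h0]
      have hlt := pvLoopA_lt b hb n hn
      have hlenL : (pvLoopA b n).length = L := by rw [hL]; simp
      refine ⟨L, by rw [hA0', hL], ?_, by rwa [hlenL] at hlt⟩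
      -- length ≥ 1 since the loop unfolds once
      have : pvLoopA b n = PySem.Int.mod n b :: pvLoopA b (PySem.Int.floordiv n b) := by
        rw [pvLoopA, dif_pos ⟨h0, hb, hn⟩]
      have hlc := congrArg List.length this
      simp only [List.length_cons] at hlc
      omega
  -- cnt computed by B equals len
  have hfd : PySem.Int.floordiv n b = n / b := PySem.Int.floordiv_eq_ediv_of_pos hbpos
  have hA0len : A0.length = len := by rw [hmap]; simp
  have hcnt : pvCountB b (PySem.Int.floordiv n b) 1 = (len : Int) := by
    by_cases h0 : n = 0
    · subst h0
      have : PySem.Int.floordiv 0 b = 0 := by rw [hfd]; simp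
      rw [this, pvCountB_eq b hb 0 1 (le_refl 0)]
      have : pvLoopA b 0 = [] := by rw [pvLoopA, dif_neg (by simp)]
      rw [this]
      have : A0.length = 1 := by rw [hA0, if_pos rfl]; rfl
      simp only [List.length_nil]
      omega
    · have hnn : 0 ≤ PySem.Int.floordiv n b := by rw [hfd]; exact Int.ediv_nonneg hn (by omega)
      rw [pvCountB_eq b hb _ 1 hnn]
      have hcons : pvLoopA b n = PySem.Int.mod n b :: pvLoopA b (PySem.Int.floordiv n b) := by
        rw [pvLoopA, dif_pos ⟨h0, hb, hn⟩]
      have hA0' : A0 = pvLoopA b n := by rw [hA0, if_neg h0]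
      have hlc := congrArg List.length hcons
      simp only [List.length_cons] at hlc
      rw [hA0'] at hA0len
      omega
  -- the padded list, uniformly
  set pad : Nat := (d - (len : Int)).toNat with hpad
  set T : Nat := len + pad with hT
  have hzero : ∀ j : Nat, len ≤ j → n / b ^ j % b = 0 := by
    intro j hj
    have : n < b ^ j := lt_of_lt_of_le hlt (pow_le_pow_right₀ (by omega) hj)
    rw [Int.ediv_eq_zero_of_lt hn this]
    simp
  have hsplit : (List.range T).map (fun j => n / b ^ j % b)
      = A0 ++ List.replicate pad 0 := by
    rw [hT, List.range_add, List.map_append, hmap, List.map_map]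
    congr 1
    rw [List.eq_replicate_iff]
    refine ⟨by simp, ?_⟩
    intro x hx
    simp only [List.mem_map, List.mem_range, Function.comp] at hx
    obtain ⟨j, _, rfl⟩ := hx
    exact hzero (len + j) (by omega)
  have hA1 :
      (if (A0.length : Int) < d then
        (PySem.List.pyRange 0 (d - (A0.length : Int)) 1).foldl (fun acc _ => acc ++ [0]) A0
      else A0) = (List.range T).map (fun j => n / b ^ j % b) := by
    rw [hsplit]
    by_cases hd : (A0.length : Int) < d
    · rw [if_pos hd]
      rw [show (fun (acc : List Int) (_ : Int) => acc ++ [0]) =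
            (fun (acc : List Int) (x : Int) => acc ++ [(fun _ => (0:Int)) x]) from rfl,
          PySem.List.foldl_append_singleton_eq_map]
      congr 1
      rw [List.map_const', PySem.List.length_pyRange_one]
      congr 1
      rw [hA0len] at hd ⊢
      omega
    · rw [if_neg hd]
      have : pad = 0 := by rw [hpad]; rw [hA0len] at hd; omega
      rw [this]
      simp
  -- assemble
  show (PySem.List.slice? _ none none (-1)).getD [] = _
  rw [hA1, PySem.List.slice?_none_none_neg_one]
  simp only [Option.getD_some]
  simp only [numToBase_alt]
  rw [hcnt]
  have h1 : ((len:Int) - 1).toNat = len - 1 := by omega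
  have h2 : ((len:Int)).toNat = len := by omega
  have h3 : (max d (len:Int) - (len:Int)).toNat = pad := by omega
  rw [h1, h2, h3, pvEmitB_eq b n hb len (len - 1) (by omega)]
  rw [hsplit, List.reverse_append, List.reverse_replicate]
  congr 1
  rw [hmap]
  apply List.ext_getElem
  · simp
  · intro k hk1 hk2
    simp only [List.length_reverse, List.length_map, List.length_range] at hk1
    rw [List.getElem_reverse]
    simp only [List.length_map, List.length_range, List.getElem_map, List.getElem_range]

-- ===== VERDICT (by name: the statement is the Claim_ definition above) =====
theorem numToBase_spec : Claim_equal_numToBase := by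
  intro n b d _ hpre
  have h : 0 ≤ n ∧ 2 ≤ b := hpre
  unfold Spec_numToBase
  exact numToBase_eq_alt n b d h.1 h.2
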